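-- pv_equiv track=rewrite | github.com/Thanhtinh06/baitapbigo | Bai5_Array/check_msnv.py | check_msnv
-- ===== SOURCE A (Python) =====
-- def check_msnv(n, a):
--     min_msnv = min(a)
--     if min_msnv > 1:
--         return 1
--     else:
--         for i in range(n):
--             if min_msnv in a:
--                 min_msnv += 1
--                 continue
--             else:
--                 return min_msnv
--         else:
--             return max(a) + 1
-- ===== SOURCE B (Python) =====
-- def check_msnv(n, a):
--     m = min(a)
--     if m > 1:
--         return 1
--     s = sorted(set(a))
--     run = 0
--     while run < len(s) and s[run] == m + run:
--         run += 1
--     return m + run if run < n else max(a) + 1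
-- ===== Notes on version B (the rewrite author's own statement) =====
-- stated objective: alternative
-- what changed: A repeatedly scans the whole list for membership while incrementing a candidate (up to n scans); B instead sorts the distinct elements once and measures the consecutive run starting at min(a) with a single linear scan, then compares the run length against n.
import Mathlib
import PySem

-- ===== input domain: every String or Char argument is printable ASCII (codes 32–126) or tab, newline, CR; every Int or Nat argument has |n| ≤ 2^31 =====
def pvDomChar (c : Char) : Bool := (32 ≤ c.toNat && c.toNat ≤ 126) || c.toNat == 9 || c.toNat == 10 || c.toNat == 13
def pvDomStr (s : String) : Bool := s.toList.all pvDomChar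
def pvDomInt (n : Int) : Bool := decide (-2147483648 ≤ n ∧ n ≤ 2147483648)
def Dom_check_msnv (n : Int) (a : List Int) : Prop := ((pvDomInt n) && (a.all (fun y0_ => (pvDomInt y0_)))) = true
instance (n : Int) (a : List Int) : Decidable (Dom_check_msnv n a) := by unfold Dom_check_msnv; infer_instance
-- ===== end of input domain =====

-- B replaces A's per-candidate whole-list membership scans by one sort of the distinct
-- elements followed by a single consecutive-run scan (objective: alternative algorithm).
-- ===== PORT A =====
-- the for-i-in-range(n) loop: at each step, if min_msnv ∈ a increment and continue, else return it;
-- none = loop exhausted (Python's for-else → max(a)+1)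
def checkLoopA (a : List Int) (fuel : Nat) (m : Int) : Option Int :=
  match fuel with
  | 0 => none
  | Nat.succ fuel' => if m ∈ a then checkLoopA a fuel' (m + 1) else some m

def check_msnv (n : Int) (a : List Int) : Int :=
  match PySem.List.min? a (fun x => x) with
  | none => 0  -- unreachable under Pre_check_msnv (Python: min([]) raises ValueError)
  | some min_msnv =>
    if min_msnv > 1 then 1
    else
      match checkLoopA a n.toNat min_msnv with
      | some v => v
      | none => (PySem.List.max? a (fun x => x)).getD 0 + 1

-- ===== PORT B =====
-- the while loop of Source B: length of the run s[0]=m, s[1]=m+1, … in the sorted distinct list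
def runLenB (s : List Int) (m : Int) (k : Nat) : Nat :=
  match s with
  | [] => k
  | x :: rest => if x = m + k then runLenB rest m (k + 1) else k

def check_msnv_alt (n : Int) (a : List Int) : Int :=
  match PySem.List.min? a (fun x => x) with
  | none => 0  -- unreachable under Pre_check_msnv
  | some m =>
    if m > 1 then 1
    else
      let s := PySem.List.sorted (PySem.Set.ofList a) (fun x => x) false
      let run := runLenB s m 0
      if (run : Int) < n then m + run
      else (PySem.List.max? a (fun x => x)).getD 0 + 1

-- ===== PRECONDITION & SPEC =====
-- Pre_ excludes only the empty list, on which Python's min(a) raises ValueError.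
def Pre_check_msnv (n : Int) (a : List Int) : Prop := a ≠ []
instance (n : Int) (a : List Int) : Decidable (Pre_check_msnv n a) := by unfold Pre_check_msnv; infer_instance
def pvWitness_check_msnv : Int × List Int := (3, [1, 2, 4])

def Spec_check_msnv (n : Int) (a : List Int) (out : Int) : Prop := out = check_msnv_alt n a
instance (n : Int) (a : List Int) (out : Int) : Decidable (Spec_check_msnv n a out) := by unfold Spec_check_msnv; infer_instance

-- ===== CLAIM (what is proved, stated in full; the proofs are below) =====
def Claim_equal_check_msnv : Prop := ∀ (n : Int) (a : List Int), Dom_check_msnv n a → Pre_check_msnv n a → Spec_check_msnv n a (check_msnv n a)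

-- ===== LEMMAS AND PROOFS =====

-- the run-start index is a lower bound of the run length
theorem runLenB_le (s : List Int) (m : Int) (k : Nat) : k ≤ runLenB s m k := by
  induction s generalizing k with
  | nil => simp [runLenB]
  | cons x rest ih =>
    simp only [runLenB]
    split
    · exact Nat.le_trans (Nat.le_succ k) (ih (k + 1))
    · exact Nat.le_refl k

-- every value m+j, k ≤ j < runLenB, occurs in the scanned list
theorem runLenB_mem (s : List Int) (m : Int) (k : Nat) :
    ∀ j : Nat, k ≤ j → j < runLenB s m k → m + (j : Int) ∈ s := by
  induction s generalizing k with
  | nil => intro j hk hj; simp [runLenB] at hj; omega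
  | cons x rest ih =>
    intro j hk hj
    simp only [runLenB] at hj
    split at hj
    · rename_i hx
      rcases Nat.eq_or_lt_of_le hk with h | h
      · subst h; simp [hx]
      · exact List.mem_cons_of_mem x (ih (k + 1) j h hj)
    · omega

-- the stopping value m + runLenB is absent from a strictly sorted list all of whose
-- elements are ≥ m + k
theorem runLenB_not_mem (s : List Int) (m : Int) (k : Nat)
    (hs : s.Pairwise (· < ·)) (hlb : ∀ y ∈ s, m + (k : Int) ≤ y) :
    m + ((runLenB s m k : Nat) : Int) ∉ s := by
  induction s generalizing k with
  | nil => simp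
  | cons x rest ih =>
    simp only [runLenB]
    rcases List.pairwise_cons.mp hs with ⟨hxr, hrest⟩
    split
    · rename_i hx
      intro hmem
      have hR := runLenB_le rest m (k + 1)
      rcases List.mem_cons.mp hmem with h | h
      · subst hx
        have : (k : Int) < ((runLenB rest m (k + 1) : Nat) : Int) := by exact_mod_cast Nat.lt_of_lt_of_le (Nat.lt_succ_self k) hR
        omega
      · exact ih (k + 1) hrest (fun y hy => by
          have := hxr y hy; push_cast; omega) h
    · rename_i hx
      intro hmem
      rcases List.mem_cons.mp hmem with h | h
      · exact hx h.symm
      · have h1 := hlb x (List.mem_cons_self)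
        have h2 := hxr _ h
        omega

-- A's loop computed from the run length of any list with the same two properties
theorem checkLoopA_eq (a : List Int) (fuel : Nat) (m : Int) (r : Nat)
    (hmem : ∀ j : Nat, j < r → m + (j : Int) ∈ a)
    (hstop : m + (r : Int) ∉ a) :
    checkLoopA a fuel m = if r < fuel then some (m + (r : Int)) else none := by
  induction fuel generalizing m r with
  | zero => simp [checkLoopA]
  | succ fuel' ih =>
    simp only [checkLoopA]
    cases r with
    | zero =>
      have : m ∉ a := by simpa using hstop
      simp [this]
    | succ r' =>
      have hm : m ∈ a := by simpa using hmem 0 (Nat.succ_pos r')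
      rw [if_pos hm]
      have := ih (m + 1) r'
        (fun j hj => by
          have h := hmem (j + 1) (by omega)
          have he : m + 1 + (j : Int) = m + ((j : Int) + 1) := by ring
          rw [he]; push_cast at h; exact h)
        (by
          have he : m + 1 + (r' : Int) = m + ((r' : Int) + 1) := by ring
          rw [he]; push_cast at hstop; exact hstop)
      rw [this]
      by_cases h : r' < fuel'
      · rw [if_pos h, if_pos (by omega)]
        congr 1; push_cast; ring
      · rw [if_neg h, if_neg (by omega)]

theorem check_msnv_spec : Claim_equal_check_msnv := by
  intro n a _hdom hpre
  unfold Spec_check_msnv check_msnv check_msnv_alt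
  cases hmin : PySem.List.min? a (fun x => x) with
  | none => rfl
  | some m =>
    dsimp only
    by_cases hg : m > 1
    · simp [hg]
    · rw [if_neg hg, if_neg hg]
      set s := PySem.List.sorted (PySem.Set.ofList a) (fun x => x) false with hs
      have hsmem : ∀ y : Int, y ∈ s ↔ y ∈ a := by
        intro y
        rw [hs, PySem.List.mem_sorted, PySem.Set.mem_ofList]
      have hpair : s.Pairwise (· < ·) := PySem.List.sorted_ofList_pairwise_lt a
      have hlb : ∀ y ∈ s, m + ((0 : Nat) : Int) ≤ y := by
        intro y hy
        have := PySem.List.min?_isMin hmin y ((hsmem y).mp hy)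
        simpa using this
      set r := runLenB s m 0 with hr
      have hmem : ∀ j : Nat, j < r → m + (j : Int) ∈ a := by
        intro j hj
        exact (hsmem _).mp (runLenB_mem s m 0 j (Nat.zero_le j) hj)
      have hstop : m + (r : Int) ∉ a := by
        intro hc
        exact runLenB_not_mem s m 0 hpair hlb ((hsmem _).mpr hc)
      rw [checkLoopA_eq a n.toNat m r hmem hstop]
      by_cases hn : (r : Int) < n
      · rw [if_pos (by omega), if_pos hn]
      · rw [if_neg (by omega), if_neg hn]
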